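-- pv_equiv track=rewrite | github.com/Boucanier/Convert-schedule-to-pdf | src/functions/element_schedule.py | clear_element
-- ===== SOURCE A (Python) =====
-- def clear_element(element_list : list[str]) -> list[str]:
--     """
--         Check if many elements are assigned to a single course
--         and add them to the main element list if they are not already in it
--
--         - Args :
--             - elementList (list[str])
--
--         - Returns :
--             - elementList (list[str])
--     """
--     to_remove = []
--     to_add = []
--     for (i, item) in enumerate(element_list):
--         if ',' in element_list[i] :
--             to_remove.append(item)
--             temp_element_list = item.split(', ')
--             _ta = [to_add.append(e) for e in temp_element_list]
--
--     for e in to_add :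
--         if e not in element_list :
--             element_list.append(e)
--
--     for e in to_remove :
--         element_list.remove(e)
--
--     return element_list
-- ===== SOURCE B (Python) =====
-- def clear_element(element_list):
--     # One-pass index build (seen set + removal counts), then a single rebuild pass.
--     # Mutates element_list in place via slice assignment, like the original.
--     seen = set(element_list)
--     remove_count = {}
--     additions = []
--     for item in element_list:
--         if ',' in item:
--             remove_count[item] = remove_count.get(item, 0) + 1
--             for piece in item.split(', '):
--                 if piece not in seen:
--                     seen.add(piece)
--                     additions.append(piece)
--     result = []
--     for item in element_list + additions:
--         c = remove_count.get(item, 0)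
--         if c > 0:
--             remove_count[item] = c - 1
--         else:
--             result.append(item)
--     element_list[:] = result
--     return element_list
-- ===== Notes on version B (the rewrite author's own statement) =====
-- stated objective: alternative
-- what changed: Replaces A's three passes (append-if-absent membership scans plus one list.remove scan per removed item) by a single indexing pass that builds a seen-set and a dict of removal counts, followed by one rebuild pass that drops the counted elements, written back in place with element_list[:] = result.
import Mathlib
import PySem

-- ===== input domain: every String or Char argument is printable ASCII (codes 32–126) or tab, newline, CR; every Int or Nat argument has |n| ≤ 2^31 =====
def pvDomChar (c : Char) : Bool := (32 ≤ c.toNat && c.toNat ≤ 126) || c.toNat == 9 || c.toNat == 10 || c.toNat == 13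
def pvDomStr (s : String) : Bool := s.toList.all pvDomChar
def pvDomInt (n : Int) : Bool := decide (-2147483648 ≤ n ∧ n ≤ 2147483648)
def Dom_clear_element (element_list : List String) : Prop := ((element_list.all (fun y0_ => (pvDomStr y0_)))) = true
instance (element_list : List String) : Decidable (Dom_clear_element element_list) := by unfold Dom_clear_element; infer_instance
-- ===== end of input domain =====

-- B replaces A's repeated in-list membership tests and repeated list.remove scans by a
-- seen-set + removal-count index built in one pass and a single rebuild pass.
-- Both Pythons mutate element_list in place and return it; the theorems are about the return value.

-- s.split(', '): Str.split? is none only for sep = "", and the separator here is the literal ", "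
def pvSplit (s : String) : List String := (PySem.Str.split? s ", ").getD []

-- ===== PORT A =====
-- loop body of A's first loop: collect (to_remove, to_add) over enumerate(element_list)
def pvA_scan_step (element_list : List String) (st : List String × List String)
    (p : Int × String) : List String × List String :=
  if PySem.Str.isIn "," (PySem.List.pyGetD element_list p.1 "") then
    (st.1 ++ [p.2], st.2 ++ pvSplit p.2)
  else st

-- loop body of A's second loop: append e if not already present
def pvA_add_step (acc : List String) (e : String) : List String :=
  if acc.contains e then acc else acc ++ [e]

-- loop body of A's third loop: element_list.remove(e).
-- The `.getD acc` (= ValueError) branch is unreachable: every value in to_remove occurs in the list.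
def pvA_rem_step (acc : List String) (e : String) : List String :=
  (PySem.List.remove? acc e).getD acc

def clear_element (element_list : List String) : List String :=
  let ra := (PySem.List.enumerate element_list).foldl (pvA_scan_step element_list) ([], [])
  let l1 := ra.2.foldl pvA_add_step element_list
  ra.1.foldl pvA_rem_step l1

-- ===== PORT B =====
-- inner loop of B's build pass: for piece in item.split(', '): if piece not in seen: …
def pvB_seen_step (q : PySem.Set String × List String) (piece : String) :
    PySem.Set String × List String :=
  if PySem.Set.contains q.1 piece then q else (PySem.Set.add q.1 piece, q.2 ++ [piece])

-- body of B's build pass: bump remove_count[item], collect the unseen pieces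
def pvB_scan_step (st : PySem.Set String × PySem.Dict String Int × List String)
    (item : String) : PySem.Set String × PySem.Dict String Int × List String :=
  if PySem.Str.isIn "," item then
    let d := PySem.Dict.insert st.2.1 item (PySem.Dict.getD st.2.1 item 0 + 1)
    let q := (pvSplit item).foldl pvB_seen_step (st.1, st.2.2)
    (q.1, d, q.2)
  else st

-- body of B's rebuild pass: drop item while its count is positive, else keep it
def pvB_drop_step (q : PySem.Dict String Int × List String) (item : String) :
    PySem.Dict String Int × List String :=
  let c := PySem.Dict.getD q.1 item 0
  if 0 < c then (PySem.Dict.insert q.1 item (c - 1), q.2) else (q.1, q.2 ++ [item])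

def clear_element_alt (element_list : List String) : List String :=
  let st := element_list.foldl pvB_scan_step
    (PySem.Set.ofList element_list, PySem.Dict.empty, [])
  ((element_list ++ st.2.2).foldl pvB_drop_step (st.2.1, [])).2

-- ===== PRECONDITION & SPEC =====
def Spec_clear_element (element_list : List String) (out : List String) : Prop := out = clear_element_alt element_list
instance (element_list : List String) (out : List String) : Decidable (Spec_clear_element element_list out) := by unfold Spec_clear_element; infer_instance

-- ===== CLAIM (what is proved, stated in full; the proofs are below) =====
def Claim_equal_clear_element : Prop := ∀ (element_list : List String), Dom_clear_element element_list → Spec_clear_element element_list (clear_element element_list)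

-- ===== LEMMAS AND PROOFS =====

-- "',' in s"
def pvHasC (s : String) : Bool := PySem.Str.isIn "," s
-- to_remove = the comma items, in order
def pvRem (l : List String) : List String := l.filter pvHasC
-- to_add = all split pieces of the comma items, in order
def pvPieces (l : List String) : List String := (l.filter pvHasC).flatMap pvSplit

-- abstract rebuild pass: drop each element whose count is positive (decrementing), keep the rest
def pvPassF (c : String → Int) : List String → List String
  | [] => []
  | h :: t =>
    if 0 < c h then pvPassF (fun x => if x = h then c x - 1 else c x) t
    else h :: pvPassF c t

theorem pvPassF_congr (c₁ c₂ : String → Int) (L : List String)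
    (h : ∀ x, c₁ x = c₂ x) : pvPassF c₁ L = pvPassF c₂ L := by
  have : c₁ = c₂ := funext h
  rw [this]

theorem pvPassF_nonpos (c : String → Int) (L : List String)
    (h : ∀ x, c x ≤ 0) : pvPassF c L = L := by
  induction L with
  | nil => rfl
  | cons hd t ih =>
    have hneg : ¬ 0 < c hd := by have := h hd; omega
    simp only [pvPassF, hneg, if_false, ih]

-- generic: a fold that skips non-c elements is a fold over the filter
theorem pv_foldl_if_skip {α β : Type} (c : α → Bool) (f : β → α → β) :
    ∀ (l : List α) (i : β),
      l.foldl (fun a x => if c x then f a x else a) i = (l.filter c).foldl f i := by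
  intro l
  induction l with
  | nil => intro i; rfl
  | cons hd t ih =>
    intro i
    by_cases hc : c hd <;> simp [List.filter_cons, hc, ih]

-- generic: a fold carrying an independent pair splits into two folds
theorem pv_foldl_pair_if {α : Type} (c : α → Bool)
    (f g : α → List String → List String) :
    ∀ (l : List α) (a b : List String),
      l.foldl (fun st x => if c x then (f x st.1, g x st.2) else st) (a, b)
        = (l.foldl (fun s x => if c x then f x s else s) a,
           l.foldl (fun s x => if c x then g x s else s) b) := by
  intro l
  induction l with
  | nil => intro a b; rfl
  | cons hd t ih =>
    intro a b
    by_cases hc : c hd <;> simp [hc, ih]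

theorem pv_foldl_app (l : List String) : ∀ (i : List String),
    l.foldl (fun s x => s ++ [x]) i = i ++ l := by
  induction l with
  | nil => intro i; simp
  | cons hd t ih => intro i; simp [ih]

-- A's first loop computes (to_remove, to_add) = (pvRem, pvPieces)
theorem pvA_scan_eq (l : List String) :
    (PySem.List.enumerate l).foldl (pvA_scan_step l) ([], []) = (pvRem l, pvPieces l) := by
  have hcong : (PySem.List.enumerate l).foldl (pvA_scan_step l) ([], [])
      = (PySem.List.enumerate l).foldl
          (fun (st : List String × List String) p =>
            if pvHasC p.2 then (st.1 ++ [p.2], st.2 ++ pvSplit p.2) else st)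
          ([], []) := by
    apply PySem.List.foldl_congr_mem
    intro acc p hp
    rcases (PySem.List.mem_enumerate_iff l 0 p).1 hp with ⟨k, hk, rfl⟩
    simp [pvA_scan_step, pvHasC, PySem.List.pyGetD_natCast, List.getD_eq_getElem?_getD,
      List.getElem?_eq_getElem hk]
  rw [hcong]
  have hmap : (PySem.List.enumerate l).foldl
      (fun (st : List String × List String) p =>
        if pvHasC p.2 then (st.1 ++ [p.2], st.2 ++ pvSplit p.2) else st)
      ([], [])
      = l.foldl
          (fun (st : List String × List String) x =>
            if pvHasC x then (st.1 ++ [x], st.2 ++ pvSplit x) else st)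
          ([], []) := by
    conv_rhs => rw [← PySem.List.map_snd_enumerate l 0]
    rw [List.foldl_map]
  rw [hmap,
    pv_foldl_pair_if pvHasC (fun x s => s ++ [x]) (fun x s => s ++ pvSplit x)]
  refine Prod.ext ?_ ?_
  · show _ = pvRem l
    rw [pv_foldl_if_skip pvHasC (fun s x => s ++ [x])]
    simpa [pvRem] using pv_foldl_app (l.filter pvHasC) []
  · show _ = pvPieces l
    rw [pv_foldl_if_skip pvHasC (fun s x => s ++ pvSplit x)]
    simpa [pvPieces] using PySem.List.foldl_append_eq_flatMap pvSplit (l.filter pvHasC) []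

-- B's build pass splits into a seen/additions fold over the pieces and a counter fold
theorem pvB_scan_eq (l : List String) :
    ∀ (s : PySem.Set String) (d : PySem.Dict String Int) (a : List String),
      l.foldl pvB_scan_step (s, d, a)
        = (((pvPieces l).foldl pvB_seen_step (s, a)).1,
           (pvRem l).foldl (fun d x => d.insert x (d.getD x 0 + 1)) d,
           ((pvPieces l).foldl pvB_seen_step (s, a)).2) := by
  induction l with
  | nil => intro s d a; rfl
  | cons hd t ih =>
    intro s d a
    rw [List.foldl_cons]
    by_cases hc : pvHasC hd
    · have hc2 : PySem.Chars.isIn [','] hd.toList = true := by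
        simpa [pvHasC] using hc
      rw [show pvB_scan_step (s, d, a) hd
          = (((pvSplit hd).foldl pvB_seen_step (s, a)).1,
             d.insert hd (d.getD hd 0 + 1),
             ((pvSplit hd).foldl pvB_seen_step (s, a)).2) from by
        simp [pvB_scan_step, hc2]]
      rw [ih]
      simp [pvPieces, pvRem, List.filter_cons, hc, List.foldl_append]
    · have hc2 : PySem.Chars.isIn [','] hd.toList = false := by
        simpa [pvHasC] using hc
      have hcF : pvHasC hd = false := by simpa [pvHasC] using hc
      rw [show pvB_scan_step (s, d, a) hd = (s, d, a) from by simp [pvB_scan_step, hc2]]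
      rw [ih]
      simp [pvPieces, pvRem, List.filter_cons, hcF]

-- B's seen-set fold agrees with A's append-if-absent fold
theorem pvB_seen_eq (ps : List String) :
    ∀ (seen : PySem.Set String) (l adds : List String),
      (∀ x, x ∈ seen ↔ x ∈ l ++ adds) →
      l ++ (ps.foldl pvB_seen_step (seen, adds)).2 = ps.foldl pvA_add_step (l ++ adds) := by
  induction ps with
  | nil => intro seen l adds _; rfl
  | cons p t ih =>
    intro seen l adds hinv
    by_cases hp : p ∈ seen
    · have hc : PySem.Set.contains seen p = true := (PySem.Set.contains_iff seen p).2 hp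
      have hmem : (l ++ adds).contains p = true := by
        simpa [List.contains_iff_mem] using (hinv p).1 hp
      simp only [List.foldl_cons, pvB_seen_step, hc, pvA_add_step, hmem]
      simp only [if_true]
      exact ih seen l adds hinv
    · have hc : PySem.Set.contains seen p = false := by
        rw [Bool.eq_false_iff]
        intro h
        exact hp ((PySem.Set.contains_iff seen p).1 h)
      have hmem : (l ++ adds).contains p = false := by
        rw [Bool.eq_false_iff]
        intro h
        exact hp ((hinv p).2 (by simpa [List.contains_iff_mem] using h))
      simp only [List.foldl_cons, pvB_seen_step, hc, Bool.false_eq_true, if_false,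
        pvA_add_step, hmem]
      have hadd : PySem.Set.add seen p = seen ++ [p] := by
        simp [PySem.Set.add, hc, hp]
      rw [hadd, List.append_assoc]
      exact ih (seen ++ [p]) l (adds ++ [p]) (by
        intro x
        constructor
        · intro hx
          rcases List.mem_append.1 hx with hx | hx
          · rcases List.mem_append.1 ((hinv x).1 hx) with h | h
            · exact List.mem_append.2 (Or.inl h)
            · exact List.mem_append.2 (Or.inr (List.mem_append.2 (Or.inl h)))
          · simp at hx
            simp [hx]
        · intro hx
          rcases List.mem_append.1 hx with hx | hx
          · exact List.mem_append.2 (Or.inl ((hinv x).2 (List.mem_append.2 (Or.inl hx))))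
          · rcases List.mem_append.1 hx with hx | hx
            · exact List.mem_append.2 (Or.inl ((hinv x).2 (List.mem_append.2 (Or.inr hx))))
            · simp at hx; simp [hx])

-- B's rebuild pass, with the dict abstracted to its count function
theorem pvB_drop_eq (L : List String) :
    ∀ (d : PySem.Dict String Int) (acc : List String),
      (L.foldl pvB_drop_step (d, acc)).2 = acc ++ pvPassF (fun x => d.getD x 0) L := by
  induction L with
  | nil => intro d acc; simp [pvPassF]
  | cons h t ih =>
    intro d acc
    by_cases hc : 0 < d.getD h 0
    · simp only [List.foldl_cons, pvB_drop_step]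
      rw [if_pos hc, ih]
      simp only [pvPassF]
      rw [if_pos hc]
      congr 1
      apply pvPassF_congr
      intro x
      rw [PySem.Dict.getD_insert]
      by_cases hx : x = h <;> simp [hx]
    · simp only [List.foldl_cons, pvB_drop_step]
      rw [if_neg hc, ih]
      simp only [pvPassF]
      rw [if_neg hc]
      simp

-- dropping one extra count of r equals erasing r first
theorem pvPassF_erase (L : List String) :
    ∀ (c : String → Int) (r : String), r ∈ L → 0 ≤ c r →
      pvPassF (fun x => c x + if x = r then 1 else 0) L = pvPassF c (L.erase r) := by
  induction L with
  | nil => intro c r hr _; exact absurd hr (by simp)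
  | cons h t ih =>
    intro c r hr hc
    by_cases hhr : h = r
    · subst hhr
      rw [List.erase_cons_head]
      simp only [pvPassF, if_true]
      rw [if_pos (show (0:Int) < c h + 1 by omega)]
      apply pvPassF_congr
      intro x
      by_cases hx : x = h <;> simp [hx] <;> omega
    · have hrt : r ∈ t := by
        rcases List.mem_cons.1 hr with h1 | h1
        · exact absurd h1.symm hhr
        · exact h1
      have herase : (h :: t).erase r = h :: t.erase r := by
        simp [List.erase_cons, hhr]
      rw [herase]
      have hfh : c h + (if h = r then (1:Int) else 0) = c h := by simp [hhr]
      by_cases hch : 0 < c h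
      · have hpos : 0 < c h + (if h = r then (1:Int) else 0) := by rw [hfh]; exact hch
        simp only [pvPassF]
        rw [if_pos hpos, if_pos hch]
        rw [show (fun x => (if x = h then (c x + if x = r then (1:Int) else 0) - 1
              else c x + if x = r then 1 else 0))
            = (fun x => (if x = h then c x - 1 else c x) + if x = r then (1:Int) else 0) from
          funext (by
            intro x
            by_cases hx : x = h
            · subst hx; simp [hhr]
            · simp [hx])]
        exact ih _ r hrt (by
          have : ¬ r = h := fun h' => hhr h'.symm
          simp [this]
          exact hc)
      · have hpos : ¬ 0 < c h + (if h = r then (1:Int) else 0) := by rw [hfh]; exact hch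
        simp only [pvPassF]
        rw [if_neg hpos, if_neg hch, ih c r hrt hc]

-- A's removal loop is the counted rebuild pass
theorem pvA_rem_eq (rem : List String) :
    ∀ (L : List String), (∀ x, rem.count x ≤ L.count x) →
      rem.foldl pvA_rem_step L = pvPassF (fun x => (rem.count x : Int)) L := by
  induction rem with
  | nil =>
    intro L _
    simp only [List.foldl_nil]
    exact (pvPassF_nonpos _ L (by simp)).symm
  | cons r rs ih =>
    intro L hcount
    have hrL : r ∈ L := by
      have h1 := hcount r
      simp [List.count_cons_self] at h1
      exact List.count_pos_iff.1 (by omega)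
    have hstep : pvA_rem_step L r = L.erase r := by
      simp [pvA_rem_step, PySem.List.remove?_eq_some_erase L r hrL]
    simp only [List.foldl_cons, hstep]
    rw [ih (L.erase r) (by
      intro x
      have h1 := hcount x
      rw [List.count_cons] at h1
      rw [List.count_erase]
      by_cases hx : x = r <;> simp [hx] at h1 ⊢ <;> omega)]
    rw [← pvPassF_erase L (fun x => (rs.count x : Int)) r hrL (by positivity)]
    apply pvPassF_congr
    intro x
    rw [List.count_cons]
    push_cast
    by_cases hx : x = r
    · simp [hx]
    · have hbx : (r == x) = false := by
        simp only [beq_eq_false_iff_ne, ne_eq]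
        exact fun h' => hx h'.symm
      simp [hx, hbx]

-- ===== VERDICT (by name: the statement is the Claim_ definition above) =====
theorem clear_element_spec : Claim_equal_clear_element := by
  intro l _
  unfold Spec_clear_element clear_element clear_element_alt
  rw [pvA_scan_eq l, pvB_scan_eq l]
  simp only
  set adds := ((pvPieces l).foldl pvB_seen_step (PySem.Set.ofList l, [])).2 with hadds
  have hseen : l ++ adds = (pvPieces l).foldl pvA_add_step l := by
    have := pvB_seen_eq (pvPieces l) (PySem.Set.ofList l) l []
      (by intro x; simp [PySem.Set.mem_ofList])
    simpa using this
  rw [PySem.Dict.foldl_insert_getD_add_one_eq_counter, pvB_drop_eq]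
  rw [List.nil_append, hseen]
  rw [pvA_rem_eq (pvRem l) ((pvPieces l).foldl pvA_add_step l) (by
    intro x
    calc (pvRem l).count x ≤ l.count x := List.Sublist.count_le x List.filter_sublist
      _ ≤ (l ++ adds).count x := by simp [List.count_append]
      _ = _ := by rw [hseen])]
  rw [← hseen]
  apply pvPassF_congr
  intro x
  rw [PySem.Dict.getD_counter]
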